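-- pv_equiv track=rewrite | github.com/lionstail18/top-knobs-shopify | scripts/tag-primary-finishes.py | premium_score
-- ===== SOURCE A (Python) =====
-- def premium_score(f):
--     if not f:
--         return 0
--     fl = f.lower()
--     if "brushed satin" in fl: return 100
--     if "polished" in fl: return 90
--     if "brushed" in fl: return 80
--     if "satin" in fl: return 75
--     if "honey" in fl: return 65
--     if "champagne" in fl or "warm brass" in fl: return 62
--     if "bronze" in fl: return 60
--     if any(w in fl for w in ("pewter", "brass", "gold", "copper")): return 50
--     if any(w in fl for w in ("ash gray", "slate", "sable", "umbrio")): return 40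
--     if "matte" in fl: return 20
--     if "flat" in fl: return 15
--     return 30
-- ===== SOURCE B (Python) =====
-- SCORES = {
--     "brushed satin": 100, "polished": 90, "brushed": 80, "satin": 75,
--     "honey": 65, "champagne": 62, "warm brass": 62, "bronze": 60,
--     "pewter": 50, "brass": 50, "gold": 50, "copper": 50,
--     "ash gray": 40, "slate": 40, "sable": 40, "umbrio": 40,
--     "matte": 20, "flat": 15,
-- }
--
-- def premium_score(f):
--     # A's cascade tries keywords in non-increasing score order, so its first
--     # match equals the MAXIMUM score over all matching keywords; compute that
--     # aggregate directly (default 30 when nothing matches).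
--     if not f:
--         return 0
--     fl = f.lower()
--     return max((s for k, s in SCORES.items() if k in fl), default=30)
-- ===== Notes on version B (the rewrite author's own statement) =====
-- stated objective: simpler
-- what changed: Replaced the ordered eleven-branch first-match cascade with a flat keyword->score dict aggregated by max over all matching keywords (default 30); correct because A tries keywords in non-increasing score order, so the first match is the maximum match.
import Mathlib
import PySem

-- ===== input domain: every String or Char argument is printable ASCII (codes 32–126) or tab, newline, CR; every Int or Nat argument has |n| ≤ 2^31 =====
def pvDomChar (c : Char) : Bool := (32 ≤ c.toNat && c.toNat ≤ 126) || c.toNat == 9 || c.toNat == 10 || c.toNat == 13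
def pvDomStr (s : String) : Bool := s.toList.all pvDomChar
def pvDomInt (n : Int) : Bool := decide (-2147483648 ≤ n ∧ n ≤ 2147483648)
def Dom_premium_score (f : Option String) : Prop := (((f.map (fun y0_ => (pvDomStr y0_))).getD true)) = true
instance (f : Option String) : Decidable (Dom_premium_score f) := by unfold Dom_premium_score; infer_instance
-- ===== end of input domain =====

-- B replaces A's ordered first-match cascade by a keyword→score table aggregated with max
-- (default 30): correct because A's cascade tries scores in non-increasing order. Same cost, simpler.

-- ===== PORT A =====
def premium_score (f : Option String) : Int :=
  match f with
  | none => 0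
  | some s =>
    if s = "" then 0 else
    let fl := PySem.Str.lower s
    if PySem.Str.isIn "brushed satin" fl then 100
    else if PySem.Str.isIn "polished" fl then 90
    else if PySem.Str.isIn "brushed" fl then 80
    else if PySem.Str.isIn "satin" fl then 75
    else if PySem.Str.isIn "honey" fl then 65
    else if PySem.Str.isIn "champagne" fl || PySem.Str.isIn "warm brass" fl then 62
    else if PySem.Str.isIn "bronze" fl then 60
    else if ["pewter", "brass", "gold", "copper"].any (fun w => PySem.Str.isIn w fl) then 50
    else if ["ash gray", "slate", "sable", "umbrio"].any (fun w => PySem.Str.isIn w fl) then 40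
    else if PySem.Str.isIn "matte" fl then 20
    else if PySem.Str.isIn "flat" fl then 15
    else 30

-- ===== PORT B =====
-- the SCORES dict of Source B (insertion order)
def pvScoreTable : List (String × Int) :=
  [("brushed satin", 100), ("polished", 90), ("brushed", 80), ("satin", 75),
   ("honey", 65), ("champagne", 62), ("warm brass", 62), ("bronze", 60),
   ("pewter", 50), ("brass", 50), ("gold", 50), ("copper", 50),
   ("ash gray", 40), ("slate", 40), ("sable", 40), ("umbrio", 40),
   ("matte", 20), ("flat", 15)]

-- Python's max(iterable, default=d)
def pvMax (l : List Int) (d : Int) : Int :=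
  match l with
  | [] => d
  | x :: r => r.foldl max x

def premium_score_alt (f : Option String) : Int :=
  match f with
  | none => 0
  | some s =>
    if s = "" then 0 else
    let fl := PySem.Str.lower s
    pvMax (pvScoreTable.filterMap (fun p => if PySem.Str.isIn p.1 fl then some p.2 else none)) 30

-- ===== PRECONDITION & SPEC =====
def Spec_premium_score (f : Option String) (out : Int) : Prop := out = premium_score_alt f
instance (f : Option String) (out : Int) : Decidable (Spec_premium_score f out) := by unfold Spec_premium_score; infer_instance

-- ===== CLAIM (what is proved, stated in full; the proofs are below) =====
def Claim_equal_premium_score : Prop := ∀ (f : Option String), Dom_premium_score f → Spec_premium_score f (premium_score f)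

-- ===== LEMMAS AND PROOFS =====

-- first-match semantics of A's cascade over a (matched?, score) table, fallback 30
def pvFirst : List (Bool × Int) → Int
  | [] => 30
  | (b, s) :: r => if b then s else pvFirst r

theorem pvFoldlMaxOfLe (r : List Int) : ∀ x : Int, (∀ y ∈ r, y ≤ x) → r.foldl max x = x := by
  induction r with
  | nil => intro x _; rfl
  | cons a t ih =>
    intro x h
    have ha : a ≤ x := h a (by simp)
    simp only [List.foldl_cons]
    rw [max_eq_left ha]
    exact ih x (fun y hy => h y (by simp [hy]))

-- On a table whose scores are non-increasing, max-of-matches (default 30) = first match (default 30).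
theorem pvMaxEqFirst (l : List (Bool × Int))
    (h : l.Pairwise (fun p q => q.2 ≤ p.2)) :
    pvMax (l.filterMap (fun p => if p.1 then some p.2 else none)) 30 = pvFirst l := by
  induction l with
  | nil => rfl
  | cons p r ih =>
    obtain ⟨b, s⟩ := p
    rw [List.pairwise_cons] at h
    cases b with
    | false =>
      rw [List.filterMap_cons_none (by rfl),
        show pvFirst ((false, s) :: r) = pvFirst r from rfl]
      exact ih h.2
    | true =>
      rw [List.filterMap_cons_some (by rfl),
        show pvFirst ((true, s) :: r) = s from rfl]
      show (List.filterMap _ r).foldl max s = s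
      apply pvFoldlMaxOfLe
      intro y hy
      rcases List.mem_filterMap.mp hy with ⟨q, hq, hqy⟩
      by_cases hb : q.1 = true
      · rw [if_pos hb] at hqy
        cases hqy
        exact h.1 q hq
      · rw [if_neg hb] at hqy
        cases hqy

theorem pvOrIte (a b : Bool) (x y : Int) :
    (if (a || b : Bool) then x else y) = if a then x else if b then x else y := by
  cases a <;> simp

theorem pvCascadeEqFirst (fl : String) :
    (if PySem.Str.isIn "brushed satin" fl then (100:Int)
    else if PySem.Str.isIn "polished" fl then 90
    else if PySem.Str.isIn "brushed" fl then 80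
    else if PySem.Str.isIn "satin" fl then 75
    else if PySem.Str.isIn "honey" fl then 65
    else if PySem.Str.isIn "champagne" fl || PySem.Str.isIn "warm brass" fl then 62
    else if PySem.Str.isIn "bronze" fl then 60
    else if ["pewter", "brass", "gold", "copper"].any (fun w => PySem.Str.isIn w fl) then 50
    else if ["ash gray", "slate", "sable", "umbrio"].any (fun w => PySem.Str.isIn w fl) then 40
    else if PySem.Str.isIn "matte" fl then 20
    else if PySem.Str.isIn "flat" fl then 15
    else 30)
    = pvFirst (pvScoreTable.map (fun p => (PySem.Str.isIn p.1 fl, p.2))) := by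
  simp only [pvScoreTable, List.map_cons, List.map_nil, pvFirst, List.any_cons, List.any_nil,
    Bool.or_false, pvOrIte]

theorem pvTablePairwise (fl : String) :
    (pvScoreTable.map (fun p => (PySem.Str.isIn p.1 fl, p.2))).Pairwise
      (fun p q => q.2 ≤ p.2) := by
  rw [List.pairwise_map]
  exact (by decide :
    pvScoreTable.Pairwise (fun a b : String × Int => b.2 ≤ a.2)).imp (fun h => h)

-- ===== VERDICT (by name: the statement is the Claim_ definition above) =====
theorem premium_score_spec : Claim_equal_premium_score := by
  intro f _
  unfold Spec_premium_score premium_score premium_score_alt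
  cases f with
  | none => rfl
  | some s =>
    by_cases h : s = ""
    · simp [h]
    · simp only [if_neg h]
      rw [pvCascadeEqFirst (PySem.Str.lower s), ← pvMaxEqFirst _ (pvTablePairwise (PySem.Str.lower s)),
        List.filterMap_map]
      rfl
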